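-- pv_equiv track=rewrite | github.com/Asutherland8219/TMU_assignments | Completed/brangelina.py | brangelina
-- ===== SOURCE A (Python) =====
-- def brangelina(first, second):
--     firstv, temp = [],[]
--     for ind, letter in enumerate(first):
--         if letter in ('a', 'e', 'i', 'o', 'u'):
--             temp.append(ind)
--         else:
--             if len(temp) > 0:
--                 firstv.append(temp)
--                 temp = []
--     if len(temp) > 0:
--                 firstv.append(temp)
--                 temp = []
--     if len(firstv) > 2:
--         firstv = firstv[:-1]
--         first = first[:int(firstv[-1][0])]
--     else:
--         first = first[:int(firstv[0][0])]
--
--     while second[0] not in ('a', 'e', 'i', 'o', 'u'):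
--         second = second[1:]
--
--     return first + second
-- ===== SOURCE B (Python) =====
-- def brangelina(first, second):
--     vowels = set('aeiou')
--     flags = [c in vowels for c in first]
--     starts = [i for i, (v, p) in enumerate(zip(flags, [False] + flags)) if v and not p]
--     cut = starts[-2] if len(starts) > 2 else starts[0]
--     j = next(i for i, c in enumerate(second) if c in vowels)
--     return first[:cut] + second[j:]
-- ===== Notes on version B (the rewrite author's own statement) =====
-- stated objective: simpler
-- what changed: B computes vowel-run start indices directly with one zip/comprehension pass and slices second at its first vowel, instead of A's nested list-of-index-runs accumulator, run-list truncation and repeated second=second[1:] re-slicing loop.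
import Mathlib
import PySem

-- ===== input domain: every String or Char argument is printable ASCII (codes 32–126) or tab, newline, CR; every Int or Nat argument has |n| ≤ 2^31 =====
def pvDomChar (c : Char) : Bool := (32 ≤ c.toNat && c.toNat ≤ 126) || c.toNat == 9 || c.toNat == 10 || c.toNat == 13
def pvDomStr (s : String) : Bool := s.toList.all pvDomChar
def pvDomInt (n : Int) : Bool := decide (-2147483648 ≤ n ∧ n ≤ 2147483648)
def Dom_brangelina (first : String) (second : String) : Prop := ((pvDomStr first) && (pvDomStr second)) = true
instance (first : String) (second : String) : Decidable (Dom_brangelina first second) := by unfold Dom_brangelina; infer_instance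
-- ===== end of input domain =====

-- B collects vowel-run START indices directly with a zip/comprehension pass (no nested index lists,
-- no list-of-runs truncation) and slices `second` at its first vowel instead of repeatedly re-slicing.

-- ===== PORT A =====
def isVowel (c : Char) : Bool := c = 'a' || c = 'e' || c = 'i' || c = 'o' || c = 'u'
-- the body of A's for-loop over enumerate(first): state = (firstv, temp)
def stepA (st : List (List Int) × List Int) (p : Int × Char) : List (List Int) × List Int :=
  if isVowel p.2 then (st.1, st.2 ++ [p.1])
  else if st.2.length > 0 then (st.1 ++ [st.2], ([] : List Int)) else st

-- A's while loop: strip second[0] while not a vowel; none = IndexError on second[0]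
def whileA : List Char → Option (List Char)
  | [] => none
  | c :: rest => if isVowel c then some (c :: rest) else whileA rest

def brangelina (first : String) (second : String) : String :=
  let st := (PySem.List.enumerate first.toList 0).foldl stepA ([], [])
  let firstv := if st.2.length > 0 then st.1 ++ [st.2] else st.1
  let cut? : Option Int :=
    if firstv.length > 2 then
      (PySem.List.pyGet? (PySem.List.slice firstv none (some (-1))) (-1)).bind
        (fun r => PySem.List.pyGet? r 0)
    else (PySem.List.pyGet? firstv 0).bind (fun r => PySem.List.pyGet? r 0)
  match cut?, whileA second.toList with
  | some k, some rest => String.ofList (PySem.List.slice first.toList none (some k) ++ rest)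
  | _, _ => ""  -- IndexError in Python (excluded by Pre_)

-- ===== PORT B =====
def isVowelB (c : Char) : Bool := "aeiou".toList.contains c

-- next(i for i, c in enumerate(second) if c in vowels); none = StopIteration
def firstVowel? (i : Int) : List Char → Option Int
  | [] => none
  | c :: rest => if isVowelB c then some i else firstVowel? (i+1) rest

def brangelina_alt (first : String) (second : String) : String :=
  let flags := first.toList.map isVowelB
  let starts := (PySem.List.enumerate (flags.zip (false :: flags)) 0).filterMap
      (fun p => if p.2.1 && !p.2.2 then some p.1 else none)
  let cut? := if starts.length > 2 then PySem.List.pyGet? starts (-2)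
              else PySem.List.pyGet? starts 0
  match cut? with
  | none => ""  -- IndexError in Python (excluded by Pre_)
  | some k =>
    match firstVowel? 0 second.toList with
    | none => ""  -- StopIteration in Python (excluded by Pre_)
    | some j =>
        String.ofList (PySem.List.slice first.toList none (some k) ++
                       PySem.List.slice second.toList (some j) none)

-- ===== PRECONDITION & SPEC =====
-- Pre_ excludes exactly the inputs where A raises IndexError: a `first` with no vowel
-- (firstv[0] on an empty list) or a `second` with no vowel (second[0] after stripping).
def Pre_brangelina (first : String) (second : String) : Prop :=
  (first.toList.any (fun c => c = 'a' || c = 'e' || c = 'i' || c = 'o' || c = 'u') = true) ∧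
  (second.toList.any (fun c => c = 'a' || c = 'e' || c = 'i' || c = 'o' || c = 'u') = true)
instance (first : String) (second : String) : Decidable (Pre_brangelina first second) := by
  unfold Pre_brangelina; infer_instance

def pvWitness_brangelina : String × String := ("brad", "angelina")

def Spec_brangelina (first : String) (second : String) (out : String) : Prop := out = brangelina_alt first second
instance (first : String) (second : String) (out : String) : Decidable (Spec_brangelina first second out) := by unfold Spec_brangelina; infer_instance

-- ===== CLAIM (what is proved, stated in full; the proofs are below) =====
def Claim_equal_brangelina : Prop := ∀ (first : String) (second : String), Dom_brangelina first second → Pre_brangelina first second → Spec_brangelina first second (brangelina first second)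

-- ===== LEMMAS AND PROOFS =====

theorem isVowelB_eq (c : Char) : isVowelB c = isVowel c := by
  simp [isVowelB, isVowel, Bool.or_assoc]
theorem isVowelB_fun : isVowelB = isVowel := funext isVowelB_eq

-- reference run decomposition: the vowel runs (as index lists) of cs, given pending run `temp` at index i
def runsAux (temp : List Int) (i : Int) : List Char → List (List Int)
  | [] => if temp.length > 0 then [temp] else []
  | c :: rest =>
      if isVowel c then runsAux (temp ++ [i]) (i+1) rest
      else (if temp.length > 0 then [temp] else []) ++ runsAux [] (i+1) rest

-- reference run starts, given whether the previous char was a vowel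
def runStarts : Bool → Int → List Char → List Int
  | _, _, [] => []
  | prev, i, c :: rest =>
      if isVowel c then (if prev then [] else [i]) ++ runStarts true (i+1) rest
      else runStarts false (i+1) rest

theorem foldA_runsAux (cs : List Char) : ∀ (i : Int) (acc : List (List Int)) (temp : List Int),
    (if (((PySem.List.enumerate cs i).foldl stepA (acc, temp)).2.length > 0) then
        ((PySem.List.enumerate cs i).foldl stepA (acc, temp)).1 ++
          [((PySem.List.enumerate cs i).foldl stepA (acc, temp)).2]
      else ((PySem.List.enumerate cs i).foldl stepA (acc, temp)).1) = acc ++ runsAux temp i cs := by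
  induction cs with
  | nil =>
    intro i acc temp
    simp only [PySem.List.enumerate_nil, List.foldl_nil, runsAux]
    split_ifs <;> simp
  | cons c rest ih =>
    intro i acc temp
    simp only [PySem.List.enumerate_cons, List.foldl_cons]
    by_cases hv : isVowel c
    · simpa [stepA, hv, runsAux] using ih (i+1) acc (temp ++ [i])
    · by_cases ht : temp.length > 0
      · simpa [stepA, hv, ht, runsAux] using ih (i+1) (acc ++ [temp]) []
      · have hte : temp = [] := by
          cases temp with
          | nil => rfl
          | cons a b => simp at ht
        subst hte
        simpa [stepA, hv, runsAux] using ih (i+1) acc []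

theorem runsAux_heads (cs : List Char) : ∀ (i : Int) (temp : List Int),
    (runsAux temp i cs).map (fun r => r.headD 0) =
      (if temp.length > 0 then [temp.headD 0] else []) ++
        runStarts (decide (temp.length > 0)) i cs := by
  induction cs with
  | nil =>
    intro i temp
    simp only [runsAux, runStarts]
    split_ifs <;> simp
  | cons c rest ih =>
    intro i temp
    by_cases hv : isVowel c
    · cases temp with
      | nil => simpa [runsAux, runStarts, hv] using ih (i+1) [i]
      | cons a b =>
        have := ih (i+1) (a :: b ++ [i])
        simpa [runsAux, runStarts, hv] using this
    · cases temp with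
      | nil => simpa [runsAux, runStarts, hv] using ih (i+1) []
      | cons a b => simpa [runsAux, runStarts, hv] using ih (i+1) []

theorem runsAux_ne_nil (cs : List Char) : ∀ (i : Int) (temp : List Int),
    ∀ r ∈ runsAux temp i cs, r ≠ [] := by
  induction cs with
  | nil =>
    intro i temp r hr
    simp only [runsAux] at hr
    split_ifs at hr with h
    · simp at hr
      subst hr
      intro he
      simp [he] at h
    · simp at hr
  | cons c rest ih =>
    intro i temp r hr
    simp only [runsAux] at hr
    split_ifs at hr with hv ht
    · exact ih (i+1) (temp ++ [i]) r hr
    · rcases List.mem_append.mp hr with h | h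
      · simp at h
        subst h
        intro he
        simp [he] at ht
      · exact ih (i+1) [] r h
    · rcases List.mem_append.mp hr with h | h
      · simp at h
      · exact ih (i+1) [] r h

theorem startsB_runStarts (cs : List Char) : ∀ (i : Int) (prev : Bool),
    (PySem.List.enumerate ((cs.map isVowel).zip (prev :: cs.map isVowel)) i).filterMap
      (fun p => if p.2.1 && !p.2.2 then some p.1 else none) = runStarts prev i cs := by
  induction cs with
  | nil => intro i prev; simp [PySem.List.enumerate_nil, runStarts]
  | cons c rest ih =>
    intro i prev
    simp only [List.map_cons, List.zip_cons_cons, PySem.List.enumerate_cons, List.filterMap_cons]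
    have h1 := ih (i+1) true
    have h0 := ih (i+1) false
    have hfun : (fun (x : Int × Bool × Bool) => if x.2.1 = true ∧ x.2.2 = false then some x.1 else none)
        = (fun (p : Int × Bool × Bool) => if (p.2.1 && !p.2.2) = true then some p.1 else none) := by
      funext p
      by_cases hp : p.2.1 <;> by_cases hq : p.2.2 <;> simp [hp, hq]
    by_cases hv : isVowel c
    · cases prev <;> simp [hv, runStarts] <;> rw [hfun] <;> exact h1
    · cases prev <;> simp [hv, runStarts] <;> rw [hfun] <;> exact h0

theorem firstVowel?_shift (cs : List Char) : ∀ (i : Int),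
    firstVowel? i cs = (firstVowel? 0 cs).map (fun j => j + i) := by
  induction cs with
  | nil => intro i; simp [firstVowel?]
  | cons c rest ih =>
    intro i
    by_cases hv : isVowel c
    · simp [firstVowel?, isVowelB_eq, hv]
    · simp only [firstVowel?, isVowelB_eq, hv, Bool.false_eq_true, ite_false, zero_add]
      rw [ih (i+1), ih 1]
      cases firstVowel? 0 rest <;> simp <;> omega

theorem firstVowel?_nonneg (cs : List Char) : ∀ (i j : Int),
    firstVowel? i cs = some j → i ≤ j := by
  induction cs with
  | nil => intro i j h; simp [firstVowel?] at h
  | cons c rest ih =>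
    intro i j h
    simp only [firstVowel?] at h
    split_ifs at h with hv
    · simp only [Option.some_inj] at h
      omega
    · have := ih (i+1) j h
      omega

theorem whileA_firstVowel (cs : List Char) :
    whileA cs = (firstVowel? 0 cs).map (fun j => PySem.List.slice cs (some j) none) := by
  induction cs with
  | nil => simp [whileA, firstVowel?]
  | cons c rest ih =>
    by_cases hv : isVowel c
    · simp [whileA, firstVowel?, isVowelB_eq, hv]
    · simp only [whileA, firstVowel?, isVowelB_eq, hv, Bool.false_eq_true, ite_false]
      rw [ih, show firstVowel? (0+1) rest = firstVowel? 1 rest from by norm_num,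
          firstVowel?_shift rest 1]
      cases h : firstVowel? 0 rest with
      | none => simp
      | some j =>
        have hj : 0 ≤ j := firstVowel?_nonneg rest 0 j h
        simp only [Option.map_some]
        congr 1
        rw [PySem.List.slice_from (c :: rest) (by omega : (0:Int) ≤ j + 1),
            PySem.List.slice_from rest hj]
        have : (j + 1).toNat = j.toNat + 1 := by omega
        simp [this]

-- the common value both ports compute
def cutSpec (cs : List Char) : Option Int :=
  if (runStarts false 0 cs).length > 2 then PySem.List.pyGet? (runStarts false 0 cs) (-2)
  else PySem.List.pyGet? (runStarts false 0 cs) 0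

def outSpec (first : String) (second : String) : String :=
  match cutSpec first.toList with
  | none => ""
  | some k =>
    match firstVowel? 0 second.toList with
    | none => ""
    | some j =>
        String.ofList (PySem.List.slice first.toList none (some k) ++
                       PySem.List.slice second.toList (some j) none)

theorem B_eq_outSpec (first : String) (second : String) :
    brangelina_alt first second = outSpec first second := by
  unfold brangelina_alt outSpec cutSpec
  dsimp only
  simp only [isVowelB_fun]
  rw [startsB_runStarts first.toList 0 false]

theorem cutA_eq_cutSpec (cs : List Char) :
    (if (runsAux [] 0 cs).length > 2 then
        (PySem.List.pyGet? (PySem.List.slice (runsAux [] 0 cs) none (some (-1))) (-1)).bind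
          (fun r => PySem.List.pyGet? r 0)
      else (PySem.List.pyGet? (runsAux [] 0 cs) 0).bind (fun r => PySem.List.pyGet? r 0)) =
    cutSpec cs := by
  have hmap : (runsAux [] 0 cs).map (fun r => r.headD 0) = runStarts false 0 cs := by
    simpa using runsAux_heads cs 0 []
  have hne := runsAux_ne_nil cs 0
  unfold cutSpec
  rw [← hmap, List.length_map]
  by_cases h2 : (runsAux [] 0 cs).length > 2
  · rw [if_pos h2, if_pos h2]
    have hlt : (runsAux [] 0 cs).length - 2 < (runsAux [] 0 cs).length := by omega
    rw [PySem.List.slice_to_neg_one, PySem.List.pyGet?_neg_one,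
        List.getLast?_eq_getElem?, List.length_dropLast]
    have hdl : ((runsAux [] 0 cs).dropLast)[(runsAux [] 0 cs).length - 1 - 1]? =
        (runsAux [] 0 cs)[(runsAux [] 0 cs).length - 2]? := by
      simp only [List.getElem?_dropLast]
      rw [if_pos (by omega),
          show (runsAux [] 0 cs).length - 1 - 1 = (runsAux [] 0 cs).length - 2 from by omega]
    rw [hdl, List.getElem?_eq_getElem hlt,
        PySem.List.pyGet?_neg_ofNat _ 2 (by omega) (by simp only [List.length_map]; omega)]
    simp only [List.length_map, List.getElem?_map, List.getElem?_eq_getElem hlt,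
      Option.map_some]
    obtain ⟨a, b, hab⟩ :=
      List.exists_cons_of_ne_nil (hne [] ((runsAux [] 0 cs)[(runsAux [] 0 cs).length - 2]) (List.getElem_mem hlt))
    simp [hab]
  · rw [if_neg h2, if_neg h2]
    cases hr : runsAux [] 0 cs with
    | nil => simp [PySem.List.pyGet?]
    | cons r t =>
      have hrne : r ≠ [] := hne [] r (by rw [hr]; exact List.mem_cons_self)
      obtain ⟨a, b, hab⟩ := List.exists_cons_of_ne_nil hrne
      subst hab
      simp

theorem A_eq_outSpec (first : String) (second : String) :
    brangelina first second = outSpec first second := by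
  unfold brangelina outSpec
  dsimp only
  rw [foldA_runsAux first.toList 0 [] []]
  simp only [List.nil_append]
  rw [whileA_firstVowel second.toList, cutA_eq_cutSpec first.toList]
  cases cutSpec first.toList <;> cases h : firstVowel? 0 second.toList <;> simp

-- ===== VERDICT (by name: the statement is the Claim_ definition above) =====
theorem brangelina_spec : Claim_equal_brangelina := by
  intro first second _ _
  unfold Spec_brangelina
  rw [A_eq_outSpec, B_eq_outSpec]
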